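-- pv_equiv track=rewrite | github.com/gaston-lm/TP1_TD- | peculiar.py | n_esimo_peculiar
-- ===== SOURCE A (Python) =====
-- def es_par (n:int) -> bool:
--     ''' Determina si un numero es par.
--         Pre: n pertenece a los enteros.
--         Post: Devuelve True si n es par y False si es impar.
--     '''
--     vr:bool = n % 2 == 0
--     return vr
--
-- def multiplo_de_22(n:int) -> bool:
--     ''' Determina si n es un número múltiplo de 22
--         Pre: n pertenece a los enteros.
--         Post: vr equivale a si n es múltiplo de 22.
--     '''
--     vr = n % 22 == 0
--     return vr
--
-- def misma_paridad (n:int, m:int) -> bool: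
--     ''' Determina si tienen la misma paridad.
--         Pre: n, m  pertenecen a L (donde L = naturales + 0)
--         Post: vr equivale a que ambos números son pares o ambos impares
--     '''
--     vr:bool = es_par(n) and es_par(m) or not es_par(n) and not es_par(m)
--     return vr
--
-- def alterna_paridad(n:int) -> bool:
--     ''' Determina si los dígitos de n alternan su paridad.
--         Pre: n pertenece a L (donde L = naturales + 0).
--         Post: vr equivale a que los dígitos de n alternen su paridad.
--     '''
--     i:int = 1
--     string_n:str = str(n)
--     vr:bool = True
--
--     # (A)
--     while i < len(string_n):
--         # (B)
--         vr = vr and not misma_paridad(int(string_n[i-1]),int(string_n[i]))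
--         i = i + 1
--         # (C)
--     # (D)
--     return vr
--
-- def es_peculiar(n:int) -> bool:
--     ''' Determina si n es lo que se considera un numero "peculiar"
--         Pre: n pertenece a L (donde L = naturales + 0)
--         Post: vr equivale a si n es peculiar si y solo si n es multiplo de 22
--         y sus digitos alternan paridad.
--     '''
--     vr:bool = multiplo_de_22(n) and alterna_paridad(n)
--     return vr
--
-- def n_esimo_peculiar(n:int) -> bool:
--     ''' Determina el n-ésimo número peculiar
--         Pre: n pertence a L (donde L = naturales + 0)
--         Post: vr equivale el i-ésimo peculiar
--     '''
--     i:int = 0 #contador del bucle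
--     j:int = 0 #recorido de números
--     vr:int = 0
--
--     # (A)
--     while i < n:
--         # (B)
--         j = j + 1
--         if es_peculiar(j):
--             i = i + 1
--             vr = j
--         # (C)
--     # (D)
--     return vr
-- ===== SOURCE B (Python) =====
-- def n_esimo_peculiar(n: int) -> int:
--     ''' n-th "peculiar" number (multiple of 22 whose digits alternate parity).
--         Instead of scanning every integer, generate the alternating-parity
--         numbers themselves, level by digit-length (each number is extended
--         only with digits of the opposite parity of its last digit), and keep
--         those divisible by 22 until the n-th is reached.
--     '''
--     if n <= 0:
--         return 0
--     cuenta = 0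
--     nivel = list(range(1, 10))          # alternating-parity numbers of 1 digit
--     while nivel:
--         for x in nivel:
--             if x % 22 == 0:
--                 cuenta += 1
--                 if cuenta == n:
--                     return x
--         nivel = [10 * x + d for x in nivel for d in range((x + 1) % 2, 10, 2)]
-- ===== Notes on version B (the rewrite author's own statement) =====
-- stated objective: faster
-- what changed: B no longer scans the integers at all: it generates the alternating-parity numbers themselves, level by digit length (extending each candidate only with digits of opposite parity), and counts those divisible by 22, whereas A tests every integer 1,2,3,... for both properties.
import Mathlib
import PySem

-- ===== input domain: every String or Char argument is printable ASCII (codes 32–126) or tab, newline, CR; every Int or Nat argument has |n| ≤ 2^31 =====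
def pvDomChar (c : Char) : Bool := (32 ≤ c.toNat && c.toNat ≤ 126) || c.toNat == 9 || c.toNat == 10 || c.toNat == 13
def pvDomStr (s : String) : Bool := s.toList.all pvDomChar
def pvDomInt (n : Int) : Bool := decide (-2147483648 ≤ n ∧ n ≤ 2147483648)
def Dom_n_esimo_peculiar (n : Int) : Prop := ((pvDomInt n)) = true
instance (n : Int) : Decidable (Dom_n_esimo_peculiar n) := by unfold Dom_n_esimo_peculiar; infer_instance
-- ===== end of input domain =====

-- B replaces A's scan of every integer by a generator of the alternating-parity
-- candidates themselves (extending each number only with digits of the opposite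
-- parity, level by digit length), filtered by divisibility by 22; measured faster.

-- ===== PORT A =====
def pvEsPar (n : Int) : Bool := PySem.Int.mod n 2 == 0

def pvMultiplo22 (n : Int) : Bool := PySem.Int.mod n 22 == 0

def pvMismaParidad (n m : Int) : Bool :=
  (pvEsPar n && pvEsPar m) || (!pvEsPar n && !pvEsPar m)

-- the while-loop of alterna_paridad; fuel = length of the digit string bounds the
-- number of iterations (i runs from 1 to len-1), so exhaustion is never reached.
-- int(string_n[i]) is ported as ofChars? of the indexed char; the index is always in
-- range and the char a digit, so the defaults of pyGetD/getD are never used.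
def pvAlternaLoop (cs : List Char) : Nat → Int → Bool → Bool
  | 0, _, vr => vr
  | f + 1, i, vr =>
    if i < (cs.length : Int) then
      pvAlternaLoop cs f (i + 1)
        (vr && !pvMismaParidad
          ((PySem.Int.ofChars? [PySem.List.pyGetD cs (i - 1) ' ']).getD 0)
          ((PySem.Int.ofChars? [PySem.List.pyGetD cs i ' ']).getD 0))
    else vr

def pvAlternaParidad (n : Int) : Bool :=
  let cs := PySem.Int.toChars n
  pvAlternaLoop cs cs.length 1 true

def pvEsPeculiar (n : Int) : Bool := pvMultiplo22 n && pvAlternaParidad n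

-- the unbounded while-loop of A; the fuel argument is only a totality guard
-- (on exhaustion the current vr is returned, i.e. the loop state so far).
def pvLoopA (n : Int) : Nat → Int → Int → Int → Int
  | 0, _, _, vr => vr
  | f + 1, i, j, vr =>
    if i < n then
      let j' := j + 1
      if pvEsPeculiar j' then pvLoopA n f (i + 1) j' j'
      else pvLoopA n f i j' vr
    else vr

-- fuel: A scans j = 1 .. 10^(min n 64 + 3) - 1; the loop stops as soon as the
-- n-th peculiar number is found, so the fuel is only a totality guard.
def n_esimo_peculiar (n : Int) : Int :=
  pvLoopA n (10 ^ (min n.toNat 64 + 3) - 1) 0 0 0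

-- ===== PORT B =====
-- nivel = [10 * x + d for x in nivel for d in range((x + 1) % 2, 10, 2)]
def pvNivelNext (nivel : List Int) : List Int :=
  nivel.flatMap (fun x =>
    (PySem.List.pyRange (PySem.Int.mod (x + 1) 2) 10 2).map (fun d => 10 * x + d))

-- the inner 'for x in nivel' with its early 'return x'; .inr = early return,
-- .inl = loop finished: updated count and the last accepted candidate
-- (the latter is carried only for the fuel-exhaustion case of pvLoopB).
def pvForNivel (n : Int) : List Int → Int → Int → (Int × Int) ⊕ Int
  | [], c, last => .inl (c, last)
  | x :: xs, c, last =>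
    if PySem.Int.mod x 22 == 0 then
      if c + 1 == n then .inr x else pvForNivel n xs (c + 1) x
    else pvForNivel n xs c last

-- the 'while nivel:' loop; fuel (number of levels) is only a totality guard.
def pvLoopB (n : Int) : Nat → List Int → Int → Int → Int
  | 0, _, _, last => last
  | d + 1, nivel, c, last =>
    if nivel = [] then last
    else
      match pvForNivel n nivel c last with
      | .inr v => v
      | .inl (c', last') => pvLoopB n d (pvNivelNext nivel) c' last'

def n_esimo_peculiar_alt (n : Int) : Int :=
  if n ≤ 0 then 0
  else pvLoopB n (min n.toNat 64 + 3) (PySem.List.pyRange 1 10 1) 0 0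

-- ===== PRECONDITION & SPEC =====
def Spec_n_esimo_peculiar (n : Int) (out : Int) : Prop := out = n_esimo_peculiar_alt n
instance (n : Int) (out : Int) : Decidable (Spec_n_esimo_peculiar n out) := by unfold Spec_n_esimo_peculiar; infer_instance

-- ===== CLAIM (what is proved, stated in full; the proofs are below) =====
def Claim_equal_n_esimo_peculiar : Prop := ∀ (n : Int), Dom_n_esimo_peculiar n → Spec_n_esimo_peculiar n (n_esimo_peculiar n)

-- ===== LEMMAS AND PROOFS =====

-- A's filtered counting step, as one fold step over a candidate j
def pvStep (n : Int) (p : Int → Bool) (s : Int × Int) (j : Int) : Int × Int :=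
  if s.1 < n then (if p j then (s.1 + 1, j) else s) else s

lemma pvStep_frozen (n : Int) (p : Int → Bool) :
    ∀ (l : List Int) (s : Int × Int), ¬ s.1 < n → l.foldl (pvStep n p) s = s := by
  intro l
  induction l with
  | nil => intro s _; rfl
  | cons x xs ih => intro s h; simp only [List.foldl_cons, pvStep, if_neg h]; exact ih s h

lemma pvStep_fst_le (n : Int) (p : Int → Bool) :
    ∀ (l : List Int) (s : Int × Int), s.1 ≤ n → (l.foldl (pvStep n p) s).1 ≤ n := by
  intro l
  induction l with
  | nil => intro s h; exact h
  | cons x xs ih =>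
    intro s h
    simp only [List.foldl_cons, pvStep]
    split_ifs with h1 h2
    · exact ih _ (by simp; omega)
    · exact ih _ h
    · exact ih _ h

-- A's while-loop is a fold of pvStep over the scanned range
lemma pvLoopA_eq_foldl (n : Int) :
    ∀ (F : Nat) (i j vr : Int),
      pvLoopA n F i j vr
        = ((PySem.List.pyRange (j + 1) (j + 1 + (F : Int)) 1).foldl
            (pvStep n pvEsPeculiar) (i, vr)).2 := by
  intro F
  induction F with
  | zero =>
    intro i j vr
    rw [PySem.List.pyRange_one_eq_nil (by omega)]
    rfl
  | succ F ih =>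
    intro i j vr
    by_cases hi : i < n
    · rw [PySem.List.pyRange_one_cons (by push_cast; omega)]
      simp only [List.foldl_cons, pvStep, if_pos hi]
      by_cases hp : pvEsPeculiar (j + 1)
      · rw [hp, if_pos rfl]
        simp only [pvLoopA, if_pos hi, hp, if_true]
        rw [ih (i + 1) (j + 1) (j + 1)]
        congr 3
        push_cast; ring_nf
      · rw [Bool.eq_false_iff.mpr hp]
        simp only [Bool.false_eq_true, if_false]
        simp only [pvLoopA, if_pos hi, Bool.eq_false_iff.mpr hp, Bool.false_eq_true, if_false]
        rw [ih i (j + 1) vr]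
        congr 2
        push_cast; ring_nf
    · simp only [pvLoopA, if_neg hi]
      rw [pvStep_frozen n pvEsPeculiar _ (i, vr) hi]

-- non-alternating candidates never change the state: the peculiar fold equals
-- the multiple-of-22 fold over the alternating candidates only
lemma foldl_pec_filter (n : Int) :
    ∀ (l : List Int) (s : Int × Int),
      l.foldl (pvStep n pvEsPeculiar) s
        = (l.filter (fun j => pvAlternaParidad j)).foldl (pvStep n pvMultiplo22) s := by
  intro l
  induction l with
  | nil => intro s; rfl
  | cons x xs ih =>
    intro s
    by_cases hx : pvAlternaParidad x
    · have : pvEsPeculiar x = pvMultiplo22 x := by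
        simp [pvEsPeculiar, hx]
      simp only [List.foldl_cons, List.filter_cons, hx, if_pos trivial]
      simp only [pvStep, this]
      exact ih _
    · have hpec : pvEsPeculiar x = false := by
        simp [pvEsPeculiar, Bool.eq_false_iff.mpr hx]
      have : pvStep n pvEsPeculiar s x = s := by
        simp [pvStep, hpec]
      simp only [List.foldl_cons, List.filter_cons, Bool.eq_false_iff.mpr hx]
      simp only [Bool.false_eq_true, if_false, this]
      exact ih _

-- ---- arithmetic characterisation of A's alterna_paridad ----

lemma pv_not_misma (x y : Int) :
    (!pvMismaParidad x y) = (PySem.Int.mod x 2 != PySem.Int.mod y 2) := by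
  rcases PySem.Int.mod_two_eq x with hx | hx <;>
    rcases PySem.Int.mod_two_eq y with hy | hy <;>
      (simp only [pvMismaParidad, pvEsPar, hx, hy]; decide)

def pvPairPred (a b : Char) : Bool :=
  PySem.Int.mod ((PySem.Int.ofChars? [a]).getD 0) 2
    != PySem.Int.mod ((PySem.Int.ofChars? [b]).getD 0) 2

def pvPairsAll (l : List Char) : Bool := (l.zip l.tail).all (fun p => pvPairPred p.1 p.2)

lemma pvPairsAll_cons_cons (a c : Char) (r : List Char) :
    pvPairsAll (a :: c :: r) = (pvPairPred a c && pvPairsAll (c :: r)) := by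
  simp [pvPairsAll]

lemma pvPairsAll_short (l : List Char) (h : l.length ≤ 1) : pvPairsAll l = true := by
  match l, h with
  | [], _ => rfl
  | [a], _ => rfl

-- A's index while-loop from position k+1 computes vr && (pairwise all over drop k)
lemma pvAlternaLoop_eq_pairs (cs : List Char) :
    ∀ (f k : Nat) (vr : Bool), cs.length ≤ f + (k + 1) →
      pvAlternaLoop cs f ((k : Int) + 1) vr = (vr && pvPairsAll (cs.drop k)) := by
  intro f
  induction f with
  | zero =>
    intro k vr h
    have h1 : (cs.drop k).length ≤ 1 := by simp; omega
    simp [pvAlternaLoop, pvPairsAll_short _ h1]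
  | succ f ih =>
    intro k vr h
    by_cases hlt : ((k : Int) + 1) < (cs.length : Int)
    · have hk1 : k + 1 < cs.length := by exact_mod_cast (by omega : ((k:Int) + 1) < (cs.length : Int))
      have hd : cs.drop k = cs[k] :: cs[k + 1] :: cs.drop (k + 2) := by
        rw [List.drop_eq_getElem_cons (by omega), List.drop_eq_getElem_cons (by omega)]
      have hd1 : cs.drop (k + 1) = cs[k + 1] :: cs.drop (k + 2) := by
        rw [List.drop_eq_getElem_cons (by omega)]
      have e1 : ((k : Int) + 1 - 1) = ((k : Nat) : Int) := by omega
      have e2 : ((k : Int) + 1) = (((k + 1 : Nat)) : Int) := by push_cast; ring_nf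
      have g1 : PySem.List.pyGetD cs ((k : Int) + 1 - 1) ' ' = cs[k] := by
        rw [e1, PySem.List.pyGetD_natCast, List.getD_eq_getElem?_getD,
          List.getElem?_eq_getElem (by omega)]
        rfl
      have g2 : PySem.List.pyGetD cs ((k : Int) + 1) ' ' = cs[k + 1] := by
        rw [e2, PySem.List.pyGetD_natCast, List.getD_eq_getElem?_getD,
          List.getElem?_eq_getElem (by omega)]
        rfl
      have step : pvAlternaLoop cs (f + 1) ((k : Int) + 1) vr
          = pvAlternaLoop cs f (((k + 1 : Nat) : Int) + 1)
              (vr && !pvMismaParidad ((PySem.Int.ofChars? [cs[k]]).getD 0)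
                ((PySem.Int.ofChars? [cs[k + 1]]).getD 0)) := by
        simp only [pvAlternaLoop, if_pos hlt, g1, g2]
        congr 1
      rw [step, ih (k + 1) _ (by omega)]
      rw [hd, hd1, pvPairsAll_cons_cons, ← hd1]
      rw [pv_not_misma]
      simp [pvPairPred, Bool.and_assoc]
    · have h1 : (cs.drop k).length ≤ 1 := by
        have : ¬ (k + 1 < cs.length) := by
          intro hc
          exact hlt (by exact_mod_cast hc)
        simp
        omega
      simp [pvAlternaLoop, if_neg hlt, pvPairsAll_short _ h1]

lemma pvAlterna_eq_pairs (j : Int) :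
    pvAlternaParidad j = pvPairsAll (PySem.Int.toChars j) := by
  have := pvAlternaLoop_eq_pairs (PySem.Int.toChars j)
    (PySem.Int.toChars j).length 0 true (by omega)
  simp only [Nat.cast_zero, zero_add] at this
  simp [pvAlternaParidad, this]

-- str(m) for a natural m, digit list built most-significant first
def pvDigits (m : Nat) : List Char :=
  if m < 10 then [Nat.digitChar m]
  else pvDigits (m / 10) ++ [Nat.digitChar (m % 10)]
decreasing_by exact Nat.div_lt_self (by omega) (by omega)

lemma toDigitsCore_eq : ∀ (f m : Nat) (ds : List Char), m < f →
    Nat.toDigitsCore 10 f m ds = pvDigits m ++ ds := by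
  intro f
  induction f with
  | zero => intro m ds h; omega
  | succ f ih =>
    intro m ds h
    by_cases hm : m < 10
    · have h0 : m / 10 = 0 := by omega
      simp only [Nat.toDigitsCore, h0]
      rw [pvDigits, if_pos hm, Nat.mod_eq_of_lt hm]
      rfl
    · have h0 : ¬ m / 10 = 0 := by omega
      simp only [Nat.toDigitsCore, h0, if_false]
      rw [ih (m / 10) _ (by omega)]
      have hunited : pvDigits m = pvDigits (m / 10) ++ [Nat.digitChar (m % 10)] := by
        rw [pvDigits]; rw [if_neg hm]
      rw [hunited]
      simp
lemma toDigits_eq (m : Nat) : Nat.toDigits 10 m = pvDigits m := by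
  have := toDigitsCore_eq (m + 1) m [] (by omega)
  simpa [Nat.toDigits] using this

-- pairwise parity test, stated arithmetically
def pvAltN (m : Nat) : Bool :=
  if m < 10 then true
  else (decide (¬ (m / 10) % 2 = m % 2)) && pvAltN (m / 10)
decreasing_by exact Nat.div_lt_self (by omega) (by omega)

lemma pvPairsAll_append (l : List Char) (c : Char) :
    pvPairsAll (l ++ [c])
      = (pvPairsAll l &&
          (match l.getLast? with | some a => pvPairPred a c | none => true)) := by
  induction l with
  | nil => simp [pvPairsAll]
  | cons a t ih =>
    cases t with
    | nil => simp [pvPairsAll]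
    | cons b t' =>
      rw [show (a :: b :: t') ++ [c] = a :: b :: (t' ++ [c]) from rfl,
        pvPairsAll_cons_cons a b (t' ++ [c]),
        show b :: (t' ++ [c]) = (b :: t') ++ [c] from rfl, ih,
        pvPairsAll_cons_cons a b t', List.getLast?_cons_cons, Bool.and_assoc]

lemma pvDigits_getLast? (m : Nat) :
    (pvDigits m).getLast? = some (Nat.digitChar (m % 10)) := by
  rw [pvDigits]
  by_cases hm : m < 10
  · rw [if_pos hm, Nat.mod_eq_of_lt hm]; rfl
  · rw [if_neg hm, List.getLast?_concat]

lemma pvPairPred_digitChar (d1 d2 : Nat) (h1 : d1 < 10) (h2 : d2 < 10) :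
    pvPairPred (Nat.digitChar d1) (Nat.digitChar d2) = decide (¬ d1 % 2 = d2 % 2) := by
  interval_cases d1 <;> interval_cases d2 <;> decide

lemma pvPairsAll_digits (m : Nat) : pvPairsAll (pvDigits m) = pvAltN m := by
  induction m using Nat.strong_induction_on with
  | _ m ih =>
    by_cases hm : m < 10
    · rw [pvDigits, if_pos hm, pvAltN, if_pos hm, pvPairsAll_short _ (by simp)]
    · rw [pvDigits, if_neg hm, pvAltN, if_neg hm, pvPairsAll_append,
        pvDigits_getLast?, ih (m / 10) (Nat.div_lt_self (by omega) (by omega))]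
      simp only []
      rw [pvPairPred_digitChar _ _ (by omega) (by omega)]
      have : (m / 10) % 10 % 2 = (m / 10) % 2 := by omega
      rw [this, show m % 10 % 2 = m % 2 by omega]
      exact Bool.and_comm _ _

lemma pvAlterna_arith (j : Int) (h : 0 ≤ j) : pvAlternaParidad j = pvAltN j.toNat := by
  rw [pvAlterna_eq_pairs, PySem.Int.toChars, if_neg (by omega), toDigits_eq,
    pvPairsAll_digits]

-- one digit appended: A's test decomposes arithmetically
lemma pvAlterna_step (x d : Int) (hx : 1 ≤ x) (hd0 : 0 ≤ d) (hd : d < 10) :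
    pvAlternaParidad (10 * x + d)
      = ((PySem.Int.mod (x + 1) 2 == PySem.Int.mod d 2) && pvAlternaParidad x) := by
  obtain ⟨a, rfl⟩ : ∃ a : Nat, x = (a : Int) := ⟨x.toNat, (Int.toNat_of_nonneg (by omega)).symm⟩
  obtain ⟨e, rfl⟩ : ∃ e : Nat, d = (e : Int) := ⟨d.toNat, (Int.toNat_of_nonneg (by omega)).symm⟩
  have ha : 1 ≤ a := by exact_mod_cast hx
  have he : e < 10 := by exact_mod_cast hd
  rw [pvAlterna_arith _ (by positivity), pvAlterna_arith _ (by positivity)]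
  have e1 : ((10 * (a : Int) + (e : Int))).toNat = 10 * a + e := by omega
  have e2 : ((a : Int)).toNat = a := by omega
  rw [e1, e2, pvAltN, if_neg (by omega)]
  have e3 : (10 * a + e) / 10 = a := by omega
  have e4 : (10 * a + e) % 2 = e % 2 := by omega
  rw [e3, e4]
  have m1 : PySem.Int.mod ((a : Int) + 1) 2 = (((a + 1) % 2 : Nat) : Int) := by
    rw [show ((a : Int) + 1) = (((a + 1 : Nat)) : Int) by push_cast; ring]
    exact_mod_cast PySem.Int.mod_natCast (a + 1) 2
  have m2 : PySem.Int.mod ((e : Int)) 2 = ((e % 2 : Nat) : Int) := by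
    exact_mod_cast PySem.Int.mod_natCast e 2
  rw [m1, m2]
  have : ((((a + 1) % 2 : Nat) : Int) == (((e % 2 : Nat)) : Int)) = decide (¬ a % 2 = e % 2) := by
    rw [Bool.eq_iff_iff]
    simp only [beq_iff_eq, Nat.cast_inj, decide_eq_true_eq]
    omega
  rw [this]

-- ---- the generated levels are exactly the alternating numbers, per decade ----

lemma pyRange_mul10 : ∀ (k : Nat) (a : Int),
    PySem.List.pyRange (10 * a) (10 * (a + (k : Int))) 1
      = (PySem.List.pyRange a (a + (k : Int)) 1).flatMap
          (fun x => PySem.List.pyRange (10 * x) (10 * x + 10) 1) := by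
  intro k
  induction k with
  | zero =>
    intro a
    simp [PySem.List.pyRange_one_eq_nil (le_refl a)]
  | succ k ih =>
    intro a
    rw [show (a + ((k + 1 : Nat) : Int)) = (a + (k : Int)) + 1 by push_cast; ring,
      PySem.List.pyRange_one_succ_right (by omega)]
    rw [List.flatMap_append, ← ih a]
    rw [show (10 * ((a + (k : Int)) + 1)) = 10 * (a + (k : Int)) + 10 by ring]
    rw [PySem.List.pyRange_one_append (10 * a) (10 * (a + (k : Int))) (10 * (a + (k : Int)) + 10)
      (by omega) (by omega)]
    simp [List.flatMap_cons]

lemma filter_alt_decade (x : Int) (hx : 1 ≤ x) :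
    (PySem.List.pyRange (10 * x) (10 * x + 10) 1).filter (fun j => pvAlternaParidad j)
      = if pvAlternaParidad x
          then (PySem.List.pyRange (PySem.Int.mod (x + 1) 2) 10 2).map (fun d => 10 * x + d)
          else [] := by
  have hrange : PySem.List.pyRange (10 * x) (10 * x + 10) 1
      = (List.range 10).map (fun k : Nat => 10 * x + (k : Int)) := by
    rw [PySem.List.pyRange_one, show ((10 * x + 10) - 10 * x).toNat = 10 by omega]
  rw [hrange, List.filter_map]
  have hcongr : ∀ k ∈ List.range 10,
      ((fun j => pvAlternaParidad j) ∘ (fun k : Nat => 10 * x + (k : Int))) k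
        = ((PySem.Int.mod (x + 1) 2 == PySem.Int.mod (k : Int) 2) && pvAlternaParidad x) := by
    intro k hk
    rw [List.mem_range] at hk
    exact pvAlterna_step x (k : Int) hx (by positivity) (by exact_mod_cast hk)
  rw [List.filter_congr hcongr]
  by_cases hax : pvAlternaParidad x
  · rw [if_pos hax]
    simp only [hax, Bool.and_true]
    rcases PySem.Int.mod_two_eq (x + 1) with hm | hm <;> rw [hm]
    · rw [show (List.range 10).filter (fun k : Nat => ((0 : Int) == PySem.Int.mod (k : Int) 2))
          = [0, 2, 4, 6, 8] from by decide,
        show PySem.List.pyRange 0 10 2 = [0, 2, 4, 6, 8] from by decide]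
      simp
    · rw [show (List.range 10).filter (fun k : Nat => ((1 : Int) == PySem.Int.mod (k : Int) 2))
          = [1, 3, 5, 7, 9] from by decide,
        show PySem.List.pyRange 1 10 2 = [1, 3, 5, 7, 9] from by decide]
      simp
  · rw [if_neg hax]
    simp [Bool.eq_false_iff.mpr hax]

lemma flatMap_ite_nil {α β : Type} (p : α → Bool) (g : α → List β) :
    ∀ (l : List α), (l.flatMap (fun x => if p x then g x else []))
      = (l.filter p).flatMap g := by
  intro l
  induction l with
  | nil => rfl
  | cons a t ih =>
    by_cases ha : p a
    · simp [List.flatMap_cons, ha, ih]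
    · simp [List.flatMap_cons, Bool.eq_false_iff.mpr ha, ih]

lemma filter_flatMap {α β : Type} (p : β → Bool) (f : α → List β) :
    ∀ (l : List α), (l.flatMap f).filter p = l.flatMap (fun x => (f x).filter p) := by
  intro l
  induction l with
  | nil => rfl
  | cons a t ih => simp [List.flatMap_cons, List.filter_append, ih]

-- pushing the generator one level: next of (alternating numbers of [a,b)) is the
-- alternating numbers of [10a, 10b)
lemma next_filter (a : Int) (k : Nat) (ha : 1 ≤ a) :
    pvNivelNext ((PySem.List.pyRange a (a + (k : Int)) 1).filter (fun j => pvAlternaParidad j))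
      = (PySem.List.pyRange (10 * a) (10 * (a + (k : Int))) 1).filter (fun j => pvAlternaParidad j) := by
  rw [pyRange_mul10, filter_flatMap]
  have hcongr : ∀ y ∈ PySem.List.pyRange a (a + (k : Int)) 1,
      (PySem.List.pyRange (10 * y) (10 * y + 10) 1).filter (fun j => pvAlternaParidad j)
        = (if pvAlternaParidad y
            then (PySem.List.pyRange (PySem.Int.mod (y + 1) 2) 10 2).map (fun d => 10 * y + d)
            else []) := by
    intro y hy
    rw [PySem.List.mem_pyRange_one] at hy
    exact filter_alt_decade y (by omega)
  rw [List.flatMap_congr hcongr,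
    flatMap_ite_nil (fun y => pvAlternaParidad y)
      (fun y => (PySem.List.pyRange (PySem.Int.mod (y + 1) 2) 10 2).map (fun d => 10 * y + d))]
  rfl

-- ---- concatenated levels = filtered full range ----

def pvConcatL : List Int → Nat → List Int
  | _, 0 => []
  | lvl, d + 1 => lvl ++ pvConcatL (pvNivelNext lvl) d

def pvU : Int → Int → Nat → List Int
  | _, _, 0 => []
  | a, b, d + 1 => PySem.List.pyRange a b 1 ++ pvU (10 * a) (10 * b) d

lemma concatL_filter : ∀ (D : Nat) (a : Int) (k : Nat), 1 ≤ a →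
    pvConcatL ((PySem.List.pyRange a (a + (k : Int)) 1).filter (fun j => pvAlternaParidad j)) D
      = (pvU a (a + (k : Int)) D).filter (fun j => pvAlternaParidad j) := by
  intro D
  induction D with
  | zero => intro a k ha; rfl
  | succ D ih =>
    intro a k ha
    rw [pvConcatL, pvU, List.filter_append]
    rw [next_filter a k ha]
    have := ih (10 * a) (10 * k) (by omega)
    rw [show (10 * a + ((10 * k : Nat) : Int)) = 10 * (a + (k : Int)) by push_cast; ring] at this
    rw [this]

lemma pvU_eq_range : ∀ (D : Nat) (a : Int), 1 ≤ a →
    pvU a (10 * a) D = PySem.List.pyRange a ((10 : Int) ^ D * a) 1 := by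
  intro D
  induction D with
  | zero =>
    intro a ha
    rw [pvU, pow_zero, one_mul, PySem.List.pyRange_one_eq_nil (le_refl a)]
  | succ D ih =>
    intro a ha
    have h10 : (1 : Int) ≤ 10 ^ D := one_le_pow₀ (by omega)
    rw [pvU, ih (10 * a) (by omega),
      ← PySem.List.pyRange_one_append a (10 * a) ((10:Int) ^ D * (10 * a)) (by omega) (by nlinarith)]
    congr 1
    ring

-- ---- B's loops as the same fold ----

lemma pvForNivel_eq (n : Int) :
    ∀ (lvl : List Int) (c last : Int), c < n →
      pvForNivel n lvl c last
        = (if (lvl.foldl (pvStep n pvMultiplo22) (c, last)).1 = n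
            then .inr (lvl.foldl (pvStep n pvMultiplo22) (c, last)).2
            else .inl (lvl.foldl (pvStep n pvMultiplo22) (c, last))) := by
  intro lvl
  induction lvl with
  | nil =>
    intro c last h
    rw [pvForNivel, List.foldl_nil, if_neg (by omega : ¬ c = n)]
  | cons x xs ih =>
    intro c last h
    by_cases hx : (PySem.Int.mod x 22 == 0) = true
    · have hstep : pvStep n pvMultiplo22 (c, last) x = (c + 1, x) := by
        simp only [pvStep, if_pos h, show pvMultiplo22 x = true from hx, if_true]
      rw [pvForNivel, if_pos hx, List.foldl_cons, hstep]
      by_cases hc : c + 1 = n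
      · rw [if_pos (by simpa using hc),
          pvStep_frozen n pvMultiplo22 xs (c + 1, x) (by simp; omega)]
        simp [hc]
      · rw [if_neg (by simpa using hc)]
        exact ih (c + 1) x (by omega)
    · have hstep : pvStep n pvMultiplo22 (c, last) x = (c, last) := by
        simp only [Bool.not_eq_true] at hx
        simp only [pvStep, if_pos h, show pvMultiplo22 x = false from hx,
          Bool.false_eq_true, if_false]
      rw [pvForNivel, if_neg hx, List.foldl_cons, hstep]
      exact ih c last h

lemma pvConcatL_nil : ∀ (D : Nat), pvConcatL [] D = [] := by
  intro D
  induction D with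
  | zero => rfl
  | succ D ih => simp [pvConcatL, pvNivelNext, ih]

lemma pvLoopB_eq_foldl (n : Int) :
    ∀ (D : Nat) (lvl : List Int) (c last : Int), c < n →
      pvLoopB n D lvl c last
        = ((pvConcatL lvl D).foldl (pvStep n pvMultiplo22) (c, last)).2 := by
  intro D
  induction D with
  | zero => intro lvl c last h; rfl
  | succ D ih =>
    intro lvl c last h
    by_cases hl : lvl = []
    · subst hl
      rw [pvConcatL_nil]
      simp [pvLoopB]
    · rw [pvLoopB, if_neg hl, pvForNivel_eq n lvl c last h]
      have hle : (lvl.foldl (pvStep n pvMultiplo22) (c, last)).1 ≤ n :=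
        pvStep_fst_le n pvMultiplo22 lvl (c, last) (by simp; omega)
      rw [pvConcatL, List.foldl_append]
      by_cases hsn : (lvl.foldl (pvStep n pvMultiplo22) (c, last)).1 = n
      · rw [if_pos hsn,
          pvStep_frozen n pvMultiplo22 _ (lvl.foldl (pvStep n pvMultiplo22) (c, last)) (by omega)]
      · rw [if_neg hsn]
        exact ih (pvNivelNext lvl) _ _ (by omega)

-- all one-digit numbers alternate trivially
lemma filter_alt_first : (PySem.List.pyRange 1 10 1).filter (fun j => pvAlternaParidad j)
    = PySem.List.pyRange 1 10 1 := by
  apply List.filter_eq_self.mpr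
  intro j hj
  rw [PySem.List.mem_pyRange_one] at hj
  rw [pvAlterna_arith j (by omega), pvAltN, if_pos (by omega)]

-- ===== VERDICT (by name: the statement is the Claim_ definition above) =====
theorem n_esimo_peculiar_spec : Claim_equal_n_esimo_peculiar := by
  intro n _
  show n_esimo_peculiar n = n_esimo_peculiar_alt n
  unfold n_esimo_peculiar n_esimo_peculiar_alt
  by_cases hn : n ≤ 0
  · rw [if_pos hn, pvLoopA_eq_foldl, pvStep_frozen n pvEsPeculiar _ (0, 0) (by simp; omega)]
  · rw [if_neg hn]
    set D := min n.toNat 64 + 3 with hD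
    have hF : ((10 ^ D - 1 : Nat) : Int) = (10 : Int) ^ D - 1 := by
      have : 1 ≤ 10 ^ D := Nat.one_le_pow _ _ (by omega)
      push_cast [this]
      ring_nf
    rw [pvLoopA_eq_foldl, hF]
    rw [show (0 : Int) + 1 + ((10 : Int) ^ D - 1) = (10 : Int) ^ D by ring,
      show (0 : Int) + 1 = (1 : Int) by ring]
    rw [foldl_pec_filter]
    rw [show (10 : Int) ^ D = (10 : Int) ^ D * 1 by ring, ← pvU_eq_range D 1 (by omega)]
    have h9 : (10 : Int) * 1 = 1 + ((9 : Nat) : Int) := by norm_num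
    rw [h9, ← concatL_filter D 1 9 (by omega)]
    rw [show (1 : Int) + ((9 : Nat) : Int) = (10 : Int) by norm_num, filter_alt_first]
    rw [pvLoopB_eq_foldl n D _ 0 0 (by omega)]
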